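-- pv_equiv track=rewrite | github.com/homebrew9/leetcode_solutions | algorithms/medium/maximum_number_of_matching_indices_after_right_shifts.py | maximumMatchingIndices_2
-- ===== SOURCE A (Python) =====
-- from typing import List
--
-- def maximumMatchingIndices_2(nums1: List[int], nums2: List[int]) -> int:
--     N = len(nums1)
--     res = 0
--     for i in range(N):
--         cnt = 0
--         for j in range(N):
--             cnt += nums1[(i + j) % N] == nums2[j]
--         res = max(res, cnt)
--     return res
-- ===== SOURCE B (Python) =====
-- from typing import List
--
-- def maximumMatchingIndices_2(nums1: List[int], nums2: List[int]) -> int: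
--     N = len(nums1)
--     pos = {}
--     for j in range(N):
--         pos.setdefault(nums2[j], []).append(j)
--     counter = {}
--     for p in range(N):
--         for j in pos.get(nums1[p], []):
--             counter[(p - j) % N] = counter.get((p - j) % N, 0) + 1
--     res = 0
--     for s in range(N):
--         res = max(res, counter.get(s, 0))
--     return res
-- ===== Notes on version B (the rewrite author's own statement) =====
-- stated objective: faster
-- what changed: Instead of rescanning both arrays for every shift (O(N^2) always), B indexes nums2's values by position once and lets each matching value pair (p,j) vote for shift (p-j) % N in a counter, then takes the max vote.
import Mathlib
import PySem

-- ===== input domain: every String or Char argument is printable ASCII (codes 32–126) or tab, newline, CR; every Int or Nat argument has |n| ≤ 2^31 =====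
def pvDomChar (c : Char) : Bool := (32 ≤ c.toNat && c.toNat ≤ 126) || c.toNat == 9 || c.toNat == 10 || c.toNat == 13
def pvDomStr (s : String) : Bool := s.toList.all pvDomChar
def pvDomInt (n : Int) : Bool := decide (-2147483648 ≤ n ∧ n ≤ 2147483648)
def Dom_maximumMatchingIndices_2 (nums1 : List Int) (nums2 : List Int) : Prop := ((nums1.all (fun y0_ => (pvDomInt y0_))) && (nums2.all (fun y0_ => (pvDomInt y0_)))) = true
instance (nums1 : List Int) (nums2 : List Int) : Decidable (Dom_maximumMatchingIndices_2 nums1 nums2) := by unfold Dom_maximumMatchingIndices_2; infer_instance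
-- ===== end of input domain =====

-- B replaces A's per-shift rescans by one pass that lets every equal value pair (p, j) vote for shift (p - j) % N in a counter; the objective is speed on typical inputs.

-- ===== PORT A =====
def maximumMatchingIndices_2 (nums1 : List Int) (nums2 : List Int) : Int :=
  let N : Int := PySem.List.len nums1
  (PySem.List.pyRange 0 N 1).foldl (fun res i =>
    let cnt : Int := (PySem.List.pyRange 0 N 1).foldl (fun cnt j =>
      cnt + (if PySem.List.pyGetD nums1 (PySem.Int.mod (i + j) N) 0 = PySem.List.pyGetD nums2 j 0 then 1 else 0)) 0
    max res cnt) 0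

-- ===== PORT B =====
def maximumMatchingIndices_2_alt (nums1 : List Int) (nums2 : List Int) : Int :=
  let N : Int := PySem.List.len nums1
  let pos : PySem.Dict Int (List Int) :=
    (PySem.List.pyRange 0 N 1).foldl
      (fun d j => d.modify (PySem.List.pyGetD nums2 j 0) [] (fun l => l ++ [j])) PySem.Dict.empty
  let counter : PySem.Dict Int Int :=
    (PySem.List.pyRange 0 N 1).foldl (fun d p =>
      (pos.getD (PySem.List.pyGetD nums1 p 0) []).foldl
        (fun d j => d.modify (PySem.Int.mod (p - j) N) 0 (fun c => c + 1)) d) PySem.Dict.empty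
  (PySem.List.pyRange 0 N 1).foldl (fun res s => max res (counter.getD s 0)) 0

-- ===== PRECONDITION & SPEC =====
-- Pre_ excludes exactly the inputs with len(nums2) < len(nums1), on which both Pythons raise IndexError (nums2[j]).
def Pre_maximumMatchingIndices_2 (nums1 : List Int) (nums2 : List Int) : Prop :=
  nums1.length ≤ nums2.length
instance (nums1 : List Int) (nums2 : List Int) : Decidable (Pre_maximumMatchingIndices_2 nums1 nums2) := by unfold Pre_maximumMatchingIndices_2; infer_instance
def pvWitness_maximumMatchingIndices_2 : List Int × List Int := ([1, 2, 3, 1], [1, 1, 2, 3])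
def Spec_maximumMatchingIndices_2 (nums1 : List Int) (nums2 : List Int) (out : Int) : Prop := out = maximumMatchingIndices_2_alt nums1 nums2
instance (nums1 : List Int) (nums2 : List Int) (out : Int) : Decidable (Spec_maximumMatchingIndices_2 nums1 nums2 out) := by unfold Spec_maximumMatchingIndices_2; infer_instance

-- ===== CLAIM (what is proved, stated in full; the proofs are below) =====
def Claim_equal_maximumMatchingIndices_2 : Prop := ∀ (nums1 : List Int) (nums2 : List Int), Dom_maximumMatchingIndices_2 nums1 nums2 → Pre_maximumMatchingIndices_2 nums1 nums2 → Spec_maximumMatchingIndices_2 nums1 nums2 (maximumMatchingIndices_2 nums1 nums2)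

-- ===== LEMMAS AND PROOFS =====

-- A nested "vote for σ p j" counter loop adds, per outer element p, the count of v among the shifts of p's bucket.
lemma pv_counter_getD (l : List Int) (g : Int → List Int) (σ : Int → Int → Int)
    (d : PySem.Dict Int Int) (v : Int) :
    (l.foldl (fun d p => (g p).foldl (fun d j => d.modify (σ p j) 0 (fun c => c + 1)) d) d).getD v 0
      = d.getD v 0 + (l.map (fun p => (((g p).map (σ p)).count v : Int))).sum := by
  induction l generalizing d with
  | nil => simp
  | cons p rest ih =>
      simp only [List.foldl_cons, List.map_cons, List.sum_cons, ih]
      have h : ((g p).foldl (fun d j => d.modify (σ p j) 0 (fun c => c + 1)) d).getD v 0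
          = d.getD v 0 + (((g p).map (σ p)).count v : Int) := by
        have h0 := PySem.Dict.getD_foldl_modify_add_one ((g p).map (σ p)) d v
        rw [List.foldl_map] at h0
        exact h0
      rw [h]; ring

-- For p < n the vote condition (p - j) % n == s picks exactly the index p = (s + j) % n.
lemma pv_mod_shift (n s p j : Nat) (hn : 0 < n) (hs : s < n) (hp : p < n) :
    (PySem.Int.mod ((p:Int) - j) n = s) ↔ p = (s + j) % n := by
  have hn' : (0:Int) < n := by exact_mod_cast hn
  rw [PySem.Int.mod_eq_emod_of_pos hn']
  constructor
  · intro h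
    have h1 : ((p:Int)) % n = ((s:Int) + j) % n := by
      calc ((p:Int)) % n = (((p:Int) - j) + j) % n := by ring_nf
        _ = ((((p:Int) - j) % n) + j) % n := (Int.emod_add_emod _ _ _).symm
        _ = ((s:Int) + j) % n := by rw [h]
    have h2 : ((p:Int)) % n = (p:Int) := Int.emod_eq_of_lt (by positivity) (by exact_mod_cast hp)
    have h3 : ((s:Int) + j) % n = (((s + j) % n : Nat) : Int) := by push_cast; ring_nf
    exact_mod_cast h2 ▸ h1.trans h3
  · intro h
    subst h
    have h1 : ((((s + j) % n : Nat) : Int)) % n = ((s:Int) + j) % n := by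
      push_cast; rw [Int.emod_emod_of_dvd _ dvd_rfl]
    rw [Int.sub_emod, h1, ← Int.sub_emod]
    have h2 : ((s:Int) + j - j) = (s:Int) := by ring
    rw [h2, Int.emod_eq_of_lt (by positivity) (by exact_mod_cast hs)]

-- Per shift s < n, A's rescan count equals B's vote counter at key s.
lemma pv_shift_count (nums1 nums2 : List Int) (n s : Nat) (hs : s < n) :
    List.foldl
      (fun cnt j =>
        cnt +
          if PySem.List.pyGetD nums1 (PySem.Int.mod ((s:Int) + j) (n:Int)) 0 = PySem.List.pyGetD nums2 j 0 then (1:Int)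
          else 0)
      (0:Int) (List.map (fun k : Nat => (k:Int)) (List.range n)) =
    (List.foldl
          (fun d p =>
            List.foldl (fun d j => d.modify (PySem.Int.mod (p - j) (n:Int)) (0:Int) fun c => c + 1) d
              ((List.foldl (fun d j => d.modify (PySem.List.pyGetD nums2 j 0) [] fun l => l ++ [j]) PySem.Dict.empty
                    (List.map (fun k : Nat => (k:Int)) (List.range n))).getD
                (PySem.List.pyGetD nums1 p 0) []))
          PySem.Dict.empty (List.map (fun k : Nat => (k:Int)) (List.range n))).getD
      ((s:Int)) 0 := by
  have hn0 : 0 < n := Nat.lt_of_le_of_lt (Nat.zero_le s) hs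
  have hpos : ∀ v : Int,
      (List.foldl (fun d j => d.modify (PySem.List.pyGetD nums2 j 0) [] fun l => l ++ [j]) PySem.Dict.empty
        (List.map (fun k : Nat => (k:Int)) (List.range n))).getD v []
      = (List.map (fun k : Nat => (k:Int)) (List.range n)).filter (fun j => PySem.List.pyGetD nums2 j 0 == v) := by
    intro v
    have h0 := PySem.Dict.getD_foldl_modify_append
      ((List.map (fun k : Nat => (k:Int)) (List.range n)).map (fun j => (PySem.List.pyGetD nums2 j 0, j)))
      PySem.Dict.empty v
    rw [List.foldl_map] at h0
    rw [h0]
    simp only [PySem.Dict.getD_empty, List.nil_append, List.filter_map, List.map_map]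
    simp only [Function.comp_def]
  simp only [hpos]
  refine Eq.trans ?_ (pv_counter_getD (List.map (fun k : Nat => (k:Int)) (List.range n))
    (fun p => List.filter (fun j => PySem.List.pyGetD nums2 j 0 == PySem.List.pyGetD nums1 p 0)
      (List.map (fun k : Nat => (k:Int)) (List.range n)))
    (fun p j => PySem.Int.mod (p - j) (n:Int)) PySem.Dict.empty (s:Int)).symm
  rw [PySem.List.foldl_add (g := fun j => if PySem.List.pyGetD nums1 (PySem.Int.mod ((s:Int) + j) (n:Int)) 0 = PySem.List.pyGetD nums2 j 0 then (1:Int) else 0)]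
  simp only [PySem.Dict.getD_empty, zero_add, List.map_map]
  simp only [List.count, List.countP_map, List.countP_filter, Function.comp_def]
  have hsum : ∀ f : Nat → Int, ((List.range n).map f).sum = ∑ i ∈ Finset.range n, f i := fun _ => rfl
  rw [hsum, hsum]
  have hcp : ∀ q : Nat → Bool, (((List.range n).countP q : Nat) : Int) = ∑ j ∈ Finset.range n, (if q j = true then (1:Int) else 0) :=
    fun q => ((PySem.List.sum_map_ite_one_zero q (List.range n)).symm).trans rfl
  simp only [hcp]
  rw [Finset.sum_comm]
  apply Finset.sum_congr rfl
  intro j hj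
  simp only [← Nat.cast_add, PySem.Int.mod_natCast, PySem.List.pyGetD_natCast,
    Bool.and_eq_true, beq_iff_eq]
  have hx : ∀ x ∈ Finset.range n,
      (if PySem.Int.mod ((x:Int) - (j:Int)) (n:Int) = (s:Int) ∧ nums2.getD j 0 = nums1.getD x 0 then (1:Int) else 0)
        = (if x = (s + j) % n then (if nums2.getD j 0 = nums1.getD x 0 then (1:Int) else 0) else 0) := by
    intro x hxn
    rw [Finset.mem_range] at hxn
    rw [if_congr (and_congr_left' (pv_mod_shift n s x j hn0 hs hxn)) rfl rfl, ite_and]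
  rw [Finset.sum_congr rfl hx,
    Finset.sum_ite_eq' (Finset.range n) ((s + j) % n) (fun x => if nums2.getD j 0 = nums1.getD x 0 then (1:Int) else 0)]
  have hr : (s + j) % n ∈ Finset.range n := Finset.mem_range.mpr (Nat.mod_lt _ hn0)
  rw [if_pos hr]
  by_cases hq : nums1.getD ((s + j) % n) 0 = nums2.getD j 0
  · rw [if_pos hq, if_pos hq.symm]
  · have hq' : ¬ (nums2.getD j 0 = nums1.getD ((s + j) % n) 0) := fun hh => hq hh.symm
    rw [if_neg hq, if_neg hq']

lemma pv_main (nums1 nums2 : List Int) :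
    maximumMatchingIndices_2 nums1 nums2 = maximumMatchingIndices_2_alt nums1 nums2 := by
  unfold maximumMatchingIndices_2 maximumMatchingIndices_2_alt
  simp only [PySem.List.len_eq, PySem.List.pyRange_zero_natCast]
  apply PySem.List.foldl_congr_mem
  intro acc i hi
  obtain ⟨s, hs, rfl⟩ : ∃ s, s < nums1.length ∧ i = (s:Int) := by
    simp only [List.mem_map, List.mem_range] at hi
    obtain ⟨s, h1, h2⟩ := hi; exact ⟨s, h1, h2.symm⟩
  congr 1
  exact pv_shift_count nums1 nums2 nums1.length s hs

-- ===== VERDICT (by name: the statement is the Claim_ definition above) =====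
theorem maximumMatchingIndices_2_spec : Claim_equal_maximumMatchingIndices_2 := by
  intro nums1 nums2 _ _
  exact pv_main nums1 nums2
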